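-- pv_equiv track=rewrite | github.com/Anemone95/D-Bundlr | evaluation/bundle_project/table3/maketable.py | get_type_to_scripts
-- ===== SOURCE A (Python) =====
-- def get_type_to_scripts(l: set[tuple[str,str]], keys: set[str]=set()):
--     total=set()
--     res = {}
--     for kind,s in l:
--         keys.add(kind)
--         res.setdefault(kind, set()).add(s)
--         total.add(s)
--     for k in res:
--         res[k] = len(res[k])
--     return res, len(total)
-- ===== SOURCE B (Python) =====
-- def get_type_to_scripts(l: set[tuple[str, str]], keys: set[str] = set()):
--     kinds = list(dict.fromkeys(kind for kind, _ in l))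
--     keys.update(kind for kind, _ in l)
--     res = {k: len({s for kind, s in l if kind == k}) for k in kinds}
--     return res, len({s for _, s in l})
-- ===== Notes on version B (the rewrite author's own statement) =====
-- stated objective: alternative
-- what changed: A maintains a dict of mutable sets plus a running total set in one interleaved loop and then rewrites the dict in place; B is two independent declarative passes: an ordered dedup of kinds with a per-kind set comprehension for the counts, and a separate global set comprehension for the total.
import Mathlib
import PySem

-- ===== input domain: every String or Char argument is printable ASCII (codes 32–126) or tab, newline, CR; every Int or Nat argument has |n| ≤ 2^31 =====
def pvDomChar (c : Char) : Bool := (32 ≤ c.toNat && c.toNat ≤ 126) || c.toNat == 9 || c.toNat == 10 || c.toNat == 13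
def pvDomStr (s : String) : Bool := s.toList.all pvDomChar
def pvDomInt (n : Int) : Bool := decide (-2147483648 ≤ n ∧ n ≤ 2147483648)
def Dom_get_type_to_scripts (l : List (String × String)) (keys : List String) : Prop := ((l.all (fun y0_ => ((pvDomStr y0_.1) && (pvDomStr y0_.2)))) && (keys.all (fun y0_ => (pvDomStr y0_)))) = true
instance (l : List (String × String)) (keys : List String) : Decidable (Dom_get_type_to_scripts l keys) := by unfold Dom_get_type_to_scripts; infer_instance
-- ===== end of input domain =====

-- B replaces A's single interleaved loop (dict of mutable sets + running total set, then an
-- in-place rewrite of the dict to counts) by independent declarative passes: ordered dedup of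
-- kinds, a per-kind set comprehension for each count, and a global set comprehension for the
-- total. Both A and B mutate the `keys` argument identically (adding every kind); the ports and
-- the equivalence proved here concern the RETURN value only.

-- ===== PORT A =====
-- loop state: (total : set, res : dict kind ↦ set of scripts); keys.add(kind) has no effect on the return value
def get_type_to_scripts (l : List (String × String)) (keys : List String) : (List (String × Int)) × Int :=
  let st := l.foldl
    (fun (st : PySem.Set String × PySem.Dict String (PySem.Set String)) p =>
      (PySem.Set.add st.1 p.2,
       st.2.insert p.1 (PySem.Set.add (st.2.getD p.1 PySem.Set.empty) p.2)))
    (PySem.Set.empty, PySem.Dict.empty)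
  -- for k in res: res[k] = len(res[k])  — rewrite each value to its length, order kept
  (st.2.items.map (fun kv => (kv.1, (PySem.Set.len kv.2 : Int))), (PySem.Set.len st.1 : Int))

-- ===== PORT B =====
def get_type_to_scripts_alt (l : List (String × String)) (keys : List String) : (List (String × Int)) × Int :=
  let kinds := PySem.List.dedup (l.map Prod.fst)
  (kinds.map (fun k =>
      (k, (PySem.Set.len (PySem.Set.ofList ((l.filter (fun p => p.1 == k)).map Prod.snd)) : Int))),
   (PySem.Set.len (PySem.Set.ofList (l.map Prod.snd)) : Int))

-- ===== PRECONDITION & SPEC =====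
def Spec_get_type_to_scripts (l : List (String × String)) (keys : List String) (out : (List (String × Int)) × Int) : Prop := out = get_type_to_scripts_alt l keys
instance (l : List (String × String)) (keys : List String) (out : (List (String × Int)) × Int) : Decidable (Spec_get_type_to_scripts l keys out) := by unfold Spec_get_type_to_scripts; infer_instance

-- ===== CLAIM (what is proved, stated in full; the proofs are below) =====
def Claim_equal_get_type_to_scripts : Prop := ∀ (l : List (String × String)) (keys : List String), Dom_get_type_to_scripts l keys → Spec_get_type_to_scripts l keys (get_type_to_scripts l keys)


-- ===== LEMMAS AND PROOFS =====

-- A's dict-building step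
def pvStep (d : PySem.Dict String (PySem.Set String)) (p : String × String) :
    PySem.Dict String (PySem.Set String) :=
  d.insert p.1 (PySem.Set.add (d.getD p.1 PySem.Set.empty) p.2)

-- B-shaped closed form of A's dict after the whole loop
def pvTab (l : List (String × String)) : List (String × PySem.Set String) :=
  (PySem.List.dedup (l.map Prod.fst)).map
    (fun k => (k, PySem.Set.ofList ((l.filter (fun p => p.1 == k)).map Prod.snd)))

theorem pvFind_self (ys : List String) (k : String) :
    List.find? (fun x => x == k) ys = if k ∈ ys then some k else none := by
  induction ys with
  | nil => simp
  | cons a t ih =>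
    by_cases h : a = k
    · subst h; simp
    · simp [h, ih, Ne.symm h]

theorem pvOfList_append_singleton {xs : List String} {y : String} :
    PySem.Set.ofList (xs ++ [y]) = PySem.Set.add (PySem.Set.ofList xs) y := by
  rw [PySem.Set.ofList_eq_foldl, PySem.Set.ofList_eq_foldl, List.foldl_append]
  rfl

theorem pvDedup_append_mem {xs : List String} {x : String} (h : x ∈ xs) :
    PySem.List.dedup (xs ++ [x]) = PySem.List.dedup xs := by
  rw [PySem.List.dedup_eq_ofList, PySem.List.dedup_eq_ofList, pvOfList_append_singleton]
  simp [PySem.Set.add, PySem.Set.contains]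
  exact h

theorem pvDedup_append_not_mem {xs : List String} {x : String} (h : x ∉ xs) :
    PySem.List.dedup (xs ++ [x]) = PySem.List.dedup xs ++ [x] := by
  rw [PySem.List.dedup_eq_ofList, PySem.List.dedup_eq_ofList, pvOfList_append_singleton]
  simp [PySem.Set.add, PySem.Set.contains]
  exact h

theorem pvFilter_eq_nil_of_not_mem {l : List (String × String)} {k : String}
    (h : k ∉ l.map Prod.fst) : l.filter (fun p => p.1 == k) = [] := by
  rw [List.filter_eq_nil_iff]
  intro p hp
  simp only [beq_iff_eq]
  intro he
  exact h (List.mem_map.mpr ⟨p, hp, he⟩)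

theorem pvGetD_tab (l : List (String × String)) (k : String) :
    (PySem.Dict.mk (pvTab l)).getD k PySem.Set.empty
      = PySem.Set.ofList ((l.filter (fun p => p.1 == k)).map Prod.snd) := by
  unfold PySem.Dict.getD PySem.Dict.get? pvTab
  rw [List.find?_map]
  have hc : ((fun p : String × PySem.Set String => p.1 == k) ∘
      (fun k' => (k', PySem.Set.ofList ((l.filter (fun p => p.1 == k')).map Prod.snd))))
      = fun x => x == k := rfl
  rw [hc, pvFind_self]
  by_cases h : k ∈ l.map Prod.fst
  · rw [if_pos ((PySem.List.mem_dedup _ _).mpr h)]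
    rfl
  · rw [if_neg (fun hm => h ((PySem.List.mem_dedup _ _).mp hm)),
        pvFilter_eq_nil_of_not_mem h]
    rfl

theorem pvContains_tab (l : List (String × String)) (k : String) :
    (PySem.Dict.mk (pvTab l)).contains k = decide (k ∈ l.map Prod.fst) := by
  by_cases h : k ∈ l.map Prod.fst
  · simp only [h, decide_true]
    simp only [PySem.Dict.contains, pvTab, List.any_map, List.any_eq_true]
    exact ⟨k, (PySem.List.mem_dedup _ _).mpr h, by simp [Function.comp]⟩
  · simp only [h, decide_false]
    simp only [PySem.Dict.contains, pvTab, List.any_map, List.any_eq_false]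
    intro x hx
    simp only [Function.comp_apply, beq_iff_eq]
    exact fun he => absurd ((PySem.List.mem_dedup _ _).mp (he ▸ hx)) h

theorem pvFold_eq_pvTab (l : List (String × String)) :
    l.foldl pvStep PySem.Dict.empty = PySem.Dict.mk (pvTab l) := by
  induction l using List.reverseRecOn with
  | nil => rfl
  | append_singleton l p ih =>
    rw [List.foldl_append, ih, List.foldl_cons, List.foldl_nil]
    unfold pvStep
    rw [pvGetD_tab]
    by_cases h : p.1 ∈ l.map Prod.fst
    · simp only [PySem.Dict.insert, pvContains_tab, h, decide_true, if_true]
      congr 1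
      unfold pvTab
      rw [List.map_append]
      simp only [List.map_cons, List.map_nil]
      rw [pvDedup_append_mem h, List.map_map]
      apply List.map_congr_left
      intro k hk
      by_cases hkp : k = p.1
      · subst hkp
        simp only [Function.comp, beq_self_eq_true, if_true]
        rw [List.filter_append, List.filter_cons, if_pos (by simp), List.filter_nil,
          List.map_append]
        simp only [List.map_cons, List.map_nil]
        rw [pvOfList_append_singleton]
      · have hb : (k == p.1) = false := by simp [hkp]
        simp only [Function.comp, hb, Bool.false_eq_true, if_false]
        rw [List.filter_append, List.filter_cons,
          if_neg (by simpa using Ne.symm hkp), List.filter_nil, List.append_nil]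
    · simp only [PySem.Dict.insert, pvContains_tab, h, decide_false, Bool.false_eq_true, if_false]
      congr 1
      rw [pvFilter_eq_nil_of_not_mem h]
      unfold pvTab
      rw [List.map_append]
      simp only [List.map_cons, List.map_nil]
      rw [pvDedup_append_not_mem h, List.map_append]
      congr 1
      · apply List.map_congr_left
        intro k hk
        have hkp : k ≠ p.1 := by
          intro he; subst he
          exact h ((PySem.List.mem_dedup _ _).mp hk)
        rw [List.filter_append, List.filter_cons,
          if_neg (by simpa using Ne.symm hkp), List.filter_nil, List.append_nil]
      · rw [List.map_cons, List.map_nil, List.filter_append, pvFilter_eq_nil_of_not_mem h,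
          List.filter_cons, if_pos (by simp), List.filter_nil]
        rfl

theorem pvTotal_eq (l : List (String × String)) :
    l.foldl (fun (s : PySem.Set String) p => PySem.Set.add s p.2) PySem.Set.empty
      = PySem.Set.ofList (l.map Prod.snd) := by
  rw [PySem.Set.ofList_eq_foldl, List.foldl_map]
  rfl

-- ===== VERDICT (by name: the statement is the Claim_ definition above) =====
theorem get_type_to_scripts_spec : Claim_equal_get_type_to_scripts := by
  intro l keys _
  unfold Spec_get_type_to_scripts get_type_to_scripts get_type_to_scripts_alt
  rw [show (fun (st : PySem.Set String × PySem.Dict String (PySem.Set String)) p =>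
        (PySem.Set.add st.1 p.2,
         st.2.insert p.1 (PySem.Set.add (st.2.getD p.1 PySem.Set.empty) p.2)))
      = (fun (st : PySem.Set String × PySem.Dict String (PySem.Set String)) p =>
        ((fun s (q : String × String) => PySem.Set.add s q.2) st.1 p, pvStep st.2 p)) from rfl,
    PySem.List.foldl_prod_mk (fun (s : PySem.Set String) (q : String × String) => PySem.Set.add s q.2) pvStep,
    pvFold_eq_pvTab, pvTotal_eq]
  simp only [pvTab, List.map_map]
  rfl
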